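-- pv_equiv track=rewrite | github.com/tokuma09/algorithm_problems | problems/chapter12/mshibatatt/006.py | MPE
-- ===== SOURCE A (Python) =====
-- from math import gcd, sqrt, ceil
--
-- def phi(n):
--     # Eular phi function
--     phi = n
--     prime_max = n
--     p = 2
--     while p*p <= prime_max:
--         if n % p == 0:
--             phi = phi*(p - 1)//p
--             while n % p == 0:
--                 n //= p
--         p += 1
--     if n > 1:
--         phi = phi*(n-1)//n # why..
--     return phi
--
-- def lcm(a, b):
--     # return int of lcm
--     return a * b // gcd(a, b)
--
-- def MPE(A, M):
--     L =30
--     if A == 0: return M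
--     if A == 1: return 1
--     if M == 1: return L
--     phiM = phi(M)
--     x = MPE(A, phiM)
--     l = lcm(phiM, M)
--     output = pow(A, x, l)
--     while output < L:
--         output += l
--     return output
-- ===== SOURCE B (Python) =====
-- from math import gcd
--
--
-- def phi(n):
--     # Euler phi, two-phase: collect the distinct prime factors first,
--     # then fold the product formula over that list.
--     primes = []
--     m = n
--     p = 2
--     while p*p <= n:
--         if m % p == 0:
--             primes.append(p)
--             while m % p == 0:
--                 m //= p
--         p += 1
--     result = n
--     for p in primes:
--         result = result*(p - 1)//p
--     if m > 1:
--         result = result*(m - 1)//m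
--     return result
--
--
-- def lcm(a, b):
--     # return int of lcm
--     return a * b // gcd(a, b)
--
--
-- def MPE(A, M):
--     # iterative version: build the phi-chain of moduli, then fold back
--     L = 30
--     if A == 0:
--         return M
--     if A == 1:
--         return 1
--     if M == 1:
--         return L
--     chain = []
--     m = M
--     while m != 1:
--         p = phi(m)
--         chain.append((m, p))
--         m = p
--     acc = L
--     for m, phiM in reversed(chain):
--         l = lcm(phiM, m)
--         output = pow(A, acc, l)
--         while output < L:
--             output += l
--         acc = output
--     return acc
-- ===== Notes on version B (the rewrite author's own statement) =====
-- stated objective: alternative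
-- what changed: Replaces A's top-down recursion by an explicit phi-chain list folded back from the innermost level, and computes Euler phi in two phases (collect the distinct prime factors, then fold the product formula) instead of updating the accumulator inside the trial-division loop.
import Mathlib
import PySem

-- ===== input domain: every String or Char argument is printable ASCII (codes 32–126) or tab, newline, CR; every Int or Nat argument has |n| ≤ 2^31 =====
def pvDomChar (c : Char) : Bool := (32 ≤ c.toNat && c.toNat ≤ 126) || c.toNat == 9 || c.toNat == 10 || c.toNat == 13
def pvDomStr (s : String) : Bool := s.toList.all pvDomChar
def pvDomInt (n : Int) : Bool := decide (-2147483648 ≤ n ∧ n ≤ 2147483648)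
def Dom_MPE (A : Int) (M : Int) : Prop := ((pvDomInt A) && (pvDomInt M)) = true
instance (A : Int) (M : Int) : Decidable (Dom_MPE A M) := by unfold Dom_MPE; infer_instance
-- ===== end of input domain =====

-- B replaces A's top-down recursion by an explicit phi-chain list folded back from the
-- innermost level, and computes Euler phi in two phases (collect the distinct prime
-- factors, then fold the product formula) — alternative decomposition, same cost.

-- ===== PORT A =====
-- inner loop of A's phi: 'while n % p == 0: n //= p' (fuel = totality guard, never exhausted on reachable inputs)
def stripA : Nat → Int → Int → Int
  | 0, n, _ => n
  | f + 1, n, p => if PySem.Int.mod n p = 0 then stripA f (PySem.Int.floordiv n p) p else n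

-- outer loop of A's phi: 'while p*p <= prime_max: …; p += 1', state (phi, n) (fuel = totality guard)
def phiOuter : Nat → Int → Int → Int → Int → Int × Int
  | 0, ph, n, _, _ => (ph, n)
  | f + 1, ph, n, primeMax, p =>
    if p * p ≤ primeMax then
      if PySem.Int.mod n p = 0 then
        phiOuter f (PySem.Int.floordiv (ph * (p - 1)) p) (stripA (n.toNat + 1) n p) primeMax (p + 1)
      else
        phiOuter f ph n primeMax (p + 1)
    else (ph, n)

-- A's Euler phi, transliterated
def phiA (n : Int) : Int :=
  let r := phiOuter (n.toNat + 2) n n n 2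
  if r.2 > 1 then PySem.Int.floordiv (r.1 * (r.2 - 1)) r.2 else r.1

-- lcm(a, b) = a * b // gcd(a, b) (math.gcd is the nonnegative gcd); same helper in A and B
def pyLcm (a b : Int) : Int := PySem.Int.floordiv (a * b) (Int.gcd a b)

-- pow(b, e, m) by binary exponentiation, shared by both ports; exact for m > 0
-- (the only reachable case inside Pre_: l = lcm(phi M, M) ≥ 1)
def pyPowMod (a : Int) (e : Nat) (m : Int) : Int :=
  if _h : e = 0 then PySem.Int.mod 1 m
  else
    let half := pyPowMod a (e / 2) m
    let s := PySem.Int.mod (half * half) m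
    if e % 2 = 1 then PySem.Int.mod (s * PySem.Int.mod a m) m else s
termination_by e
decreasing_by omega

-- 'while output < L: output += l' fixup loop, verbatim in A and B; the 'l ≤ 0' branch is a
-- totality guard (Python diverges there; unreachable inside Pre_)
def fixup (output l : Int) : Int :=
  if _h : output < 30 then
    if _hl : l ≤ 0 then output else fixup (output + l) l
  else output
termination_by (30 - output).toNat
decreasing_by omega

-- A's recursion, fueled (fuel is a totality guard: phi decreases the modulus, so
-- M.toNat + 1 steps always suffice on inputs where Python A returns)
def MPEgo : Nat → Int → Int → Int
  | 0, _, _ => 30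
  | f + 1, A, M =>
    if A = 0 then M
    else if A = 1 then 1
    else if M = 1 then 30
    else
      let phiM := phiA M
      let x := MPEgo f A phiM
      let l := pyLcm phiM M
      -- pow(A, x, l): x ≥ 0 on all reachable calls, so the Nat exponent is exact
      let output := pyPowMod A x.toNat l
      fixup output l

def MPE (A : Int) (M : Int) : Int := MPEgo (M.toNat + 1) A M

-- ===== PORT B =====
-- phase 1 of B's phi: collect the distinct prime factors found by trial division,
-- returning (primes, leftover m) (fuel = totality guard)
def collectGo : Nat → Int → Int → Int → List Int × Int
  | 0, m, _, _ => ([], m)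
  | f + 1, m, bound, p =>
    if p * p ≤ bound then
      if PySem.Int.mod m p = 0 then
        let r := collectGo f (stripA (m.toNat + 1) m p) bound (p + 1)
        (p :: r.1, r.2)
      else collectGo f m bound (p + 1)
    else ([], m)

-- phase 2: fold the product formula over the collected primes
def phiB (n : Int) : Int :=
  let r := collectGo (n.toNat + 2) n n 2
  let result := r.1.foldl (fun a p => PySem.Int.floordiv (a * (p - 1)) p) n
  if r.2 > 1 then PySem.Int.floordiv (result * (r.2 - 1)) r.2 else result

-- 'while m != 1: chain.append((m, phi(m))); m = phi(m)' (fuel = totality guard)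
def chainGo : Nat → Int → List (Int × Int)
  | 0, _ => []
  | f + 1, m => if m = 1 then [] else let p := phiB m; (m, p) :: chainGo f p

-- body of B's 'for m, phiM in reversed(chain)' loop
def stepB (A : Int) (acc : Int) (mp : Int × Int) : Int :=
  let l := pyLcm mp.2 mp.1
  let output := pyPowMod A acc.toNat l
  fixup output l

def MPE_alt (A : Int) (M : Int) : Int :=
  if A = 0 then M
  else if A = 1 then 1
  else if M = 1 then 30
  else ((chainGo (M.toNat + 1) M).reverse).foldl (stepB A) 30

-- ===== PRECONDITION & SPEC =====
-- Pre_ excludes M ≤ 0 with A ∉ {0, 1}: there phi(M) = M, so Python A recurses forever (RecursionError).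
def Pre_MPE (A : Int) (M : Int) : Prop := A = 0 ∨ A = 1 ∨ 1 ≤ M
instance (A : Int) (M : Int) : Decidable (Pre_MPE A M) := by unfold Pre_MPE; infer_instance
def pvWitness_MPE : Int × Int := (2, 10)
def Spec_MPE (A : Int) (M : Int) (out : Int) : Prop := out = MPE_alt A M
instance (A : Int) (M : Int) (out : Int) : Decidable (Spec_MPE A M out) := by unfold Spec_MPE; infer_instance

-- ===== CLAIM =====
def Claim_equal_MPE : Prop := ∀ (A : Int) (M : Int), Dom_MPE A M → Pre_MPE A M → Spec_MPE A M (MPE A M)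

-- ===== LEMMAS AND PROOFS =====
-- A's in-loop phi accumulator equals B's fold over the collected primes
lemma phiOuter_eq_collect :
    ∀ (f : Nat) (ph n bound p : Int),
      phiOuter f ph n bound p
        = ((collectGo f n bound p).1.foldl (fun a q => PySem.Int.floordiv (a * (q - 1)) q) ph,
           (collectGo f n bound p).2) := by
  intro f
  induction f with
  | zero => intro ph n bound p; simp [phiOuter, collectGo]
  | succ f ih =>
    intro ph n bound p
    by_cases hle : p * p ≤ bound
    · by_cases hdvd : PySem.Int.mod n p = 0
      · simp [phiOuter, collectGo, hle, hdvd, ih]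
      · simp [phiOuter, collectGo, hle, hdvd, ih]
    · simp [phiOuter, collectGo, hle]

lemma phiA_eq_phiB (n : Int) : phiA n = phiB n := by
  unfold phiA phiB
  rw [phiOuter_eq_collect]

lemma mpego_eq_fold (A : Int) (hA0 : A ≠ 0) (hA1 : A ≠ 1) :
    ∀ (f : Nat) (m : Int), MPEgo f A m = ((chainGo f m).reverse).foldl (stepB A) 30 := by
  intro f
  induction f with
  | zero => intro m; simp [MPEgo, chainGo]
  | succ f ih =>
    intro m
    by_cases hm : m = 1
    · simp [MPEgo, chainGo, hm, hA0, hA1]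
    · simp only [MPEgo, chainGo, hm, hA0, hA1, if_false]
      simp [List.foldl_append, ih (phiB m), stepB, phiA_eq_phiB]

-- ===== VERDICT =====
theorem MPE_spec : Claim_equal_MPE := by
  intro A M _ _
  unfold Spec_MPE MPE MPE_alt
  by_cases hA0 : A = 0
  · simp [MPEgo, hA0]
  by_cases hA1 : A = 1
  · simp [MPEgo, hA1]
  by_cases hM : M = 1
  · simp [MPEgo, hA0, hA1, hM]
  · simp only [hA0, hA1, hM, if_false]
    rw [mpego_eq_fold A hA0 hA1]
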